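-- pv_equiv track=rewrite | github.com/Vestenar/PythonProjects | 02_Codesignal/02_The Core/083_cipher26.py | cipher26
-- ===== SOURCE A (Python) =====
-- def cipher26(message):
--     ans = message[0]
--     for i in range(1, len(message)):
--         s = sum([ord(j)-97 for j in ans]) % 26
--         for n in range(2):
--             x = 26 * n + (ord(message[i]) - 97) - s
--             if 0 <= x <=25:
--                 break
--         ans += chr(x+97)
--     return ans
-- ===== SOURCE B (Python) =====
-- def cipher26(message):
--     # O(n): keep a running total of decoded char values instead of re-summing ans each step
--     out = [message[0]]
--     total = ord(message[0]) - 97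
--     for ch in message[1:]:
--         x = ord(ch) - 97 - total % 26
--         if not (0 <= x <= 25):
--             x += 26
--         out.append(chr(x + 97))
--         total += x
--     return ''.join(out)
-- ===== Notes on version B (the rewrite author's own statement) =====
-- stated objective: faster
-- what changed: B maintains a running sum of decoded character values and builds the output in a list, replacing A's per-step re-summation of the whole prefix (and its inner 2-iteration adjustment loop) with one O(1) update per character.
-- outside the precondition, e.g. on cipher26(''): A raises IndexError, B raises IndexError
import Mathlib
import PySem

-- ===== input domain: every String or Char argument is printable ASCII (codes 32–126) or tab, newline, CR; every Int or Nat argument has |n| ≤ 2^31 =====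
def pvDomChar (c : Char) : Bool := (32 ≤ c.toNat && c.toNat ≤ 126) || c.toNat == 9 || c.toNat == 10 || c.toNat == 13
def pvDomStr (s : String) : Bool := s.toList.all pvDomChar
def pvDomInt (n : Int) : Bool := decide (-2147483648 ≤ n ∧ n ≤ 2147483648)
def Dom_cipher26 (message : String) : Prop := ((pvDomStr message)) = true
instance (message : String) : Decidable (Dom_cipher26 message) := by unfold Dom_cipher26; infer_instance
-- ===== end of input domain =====

-- B replaces A's per-step re-summation of the whole decoded prefix by one running total (O(n) vs O(n^2)).

-- ===== PORT A =====
-- one iteration of A's outer loop: re-sums all of ans, then the 2-step inner adjustment loop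
def cipher26_stepA (ans : List Char) (ch : Char) : List Char :=
  let s : Int := PySem.Int.mod ((ans.map (fun j => (j.toNat : Int) - 97)).sum) 26
  let c : Int := (ch.toNat : Int) - 97
  -- 'for n in range(2): x = 26*n + c - s; if 0 <= x <= 25: break' — after the loop x is
  -- the n=0 value if it was in range, otherwise the n=1 value (whether in range or not)
  let x1 : Int := 26 * 0 + c - s
  let x : Int := if 0 ≤ x1 ∧ x1 ≤ 25 then x1 else 26 * 1 + c - s
  ans ++ [Char.ofNat (x + 97).toNat]

def cipher26 (message : String) : String :=
  match message.toList with
  | [] => ""   -- Python raises IndexError here; excluded by Pre_cipher26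
  | c0 :: rest => String.mk (rest.foldl cipher26_stepA [c0])

-- ===== PORT B =====
-- one iteration of B's loop: state = (output so far, running total of decoded values)
def cipher26_stepB (st : List Char × Int) (ch : Char) : List Char × Int :=
  let x0 : Int := (ch.toNat : Int) - 97 - PySem.Int.mod st.2 26
  let x : Int := if 0 ≤ x0 ∧ x0 ≤ 25 then x0 else x0 + 26
  (st.1 ++ [Char.ofNat (x + 97).toNat], st.2 + x)

def cipher26_alt (message : String) : String :=
  match message.toList with
  | [] => ""   -- Python raises IndexError here; excluded by Pre_cipher26
  | c0 :: rest => String.mk (rest.foldl cipher26_stepB ([c0], (c0.toNat : Int) - 97)).1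

-- ===== PRECONDITION & SPEC =====
-- Pre_ excludes only the empty string, on which A raises IndexError (message[0]).
def Pre_cipher26 (message : String) : Prop := message ≠ ""
instance (message : String) : Decidable (Pre_cipher26 message) := by unfold Pre_cipher26; infer_instance
def pvWitness_cipher26 : String := ("abc")

def Spec_cipher26 (message : String) (out : String) : Prop := out = cipher26_alt message
instance (message : String) (out : String) : Decidable (Spec_cipher26 message out) := by unfold Spec_cipher26; infer_instance

-- ===== CLAIM (what is proved, stated in full; the proofs are below) =====
def Claim_equal_cipher26 : Prop := ∀ (message : String), Dom_cipher26 message → Pre_cipher26 message → Spec_cipher26 message (cipher26 message)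

-- ===== LEMMAS AND PROOFS =====

lemma toNat_ofNat_small (n : Nat) (h : n < 55296) : (Char.ofNat n).toNat = n := by
  have hv : n.isValidChar := Or.inl h
  simp [Char.ofNat, hv, Char.ofNatAux, Char.toNat]

-- the loop invariant: B's running total equals the sum A re-computes, so the folds agree
lemma cipher26_loop (rest : List Char) : ∀ (ans : List Char) (total : Int),
    rest.all pvDomChar = true →
    total = (ans.map (fun j => (j.toNat : Int) - 97)).sum →
    rest.foldl cipher26_stepA ans = (rest.foldl cipher26_stepB (ans, total)).1 := by
  induction rest with
  | nil => intro ans total _ _; rfl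
  | cons ch rest ih =>
    intro ans total hall hinv
    simp only [List.all_cons, Bool.and_eq_true] at hall
    have hdom : pvDomChar ch = true := hall.1
    have hch : 9 ≤ (ch.toNat : Int) ∧ (ch.toNat : Int) ≤ 126 := by
      unfold pvDomChar at hdom
      simp only [Bool.or_eq_true, Bool.and_eq_true, decide_eq_true_eq, beq_iff_eq,
        Nat.le_iff_lt_or_eq] at hdom
      omega
    have hs0 : 0 ≤ PySem.Int.mod total 26 := PySem.Int.mod_nonneg _ (by norm_num)
    have hs1 : PySem.Int.mod total 26 < 26 := PySem.Int.mod_lt _ (by norm_num)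
    simp only [List.foldl_cons]
    -- the appended character and the decoded value x agree between the two steps
    set s := PySem.Int.mod total 26 with hs
    set c : Int := (ch.toNat : Int) - 97 with hc
    set x : Int := if 0 ≤ c - s ∧ c - s ≤ 25 then c - s else c - s + 26 with hx
    have hxA : cipher26_stepA ans ch = ans ++ [Char.ofNat (x + 97).toNat] := by
      simp only [cipher26_stepA, hx, ← hinv, ← hs, ← hc]
      norm_num
      split_ifs <;> norm_num <;> ring_nf
    have hxB : cipher26_stepB (ans, total) ch
        = (ans ++ [Char.ofNat (x + 97).toNat], total + x) := by
      simp only [cipher26_stepB, hx, ← hs, ← hc]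
    rw [hxA, hxB]
    apply ih
    · exact hall.2
    · -- the running total stays equal to the sum over the extended prefix
      have hxlo : 0 ≤ x + 97 := by rcases hch with ⟨h1, h2⟩; rw [hx, hc]; split_ifs <;> omega
      have hxhi : x + 97 < 55296 := by rcases hch with ⟨h1, h2⟩; rw [hx, hc]; split_ifs <;> omega
      have hrt : ((Char.ofNat (x + 97).toNat).toNat : Int) = x + 97 := by
        rw [toNat_ofNat_small _ (by omega)]; omega
      simp [hinv, hrt]

-- ===== VERDICT (by name: the statement is the Claim_ definition above) =====
theorem cipher26_spec : Claim_equal_cipher26 := by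
  intro message hdom _
  unfold Spec_cipher26 cipher26 cipher26_alt
  cases hml : message.toList with
  | nil => rfl
  | cons c0 rest =>
    dsimp only
    have hall : rest.all pvDomChar = true := by
      have := hdom; unfold Dom_cipher26 pvDomStr at this
      rw [hml] at this; simp [List.all_cons] at this; simp [List.all_eq_true]
      intro a ha; exact this.2 a ha
    rw [cipher26_loop rest [c0] ((c0.toNat : Int) - 97) hall (by simp)]
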